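-- pv_equiv track=rewrite | github.com/mjcaley/adventofcode2021 | adventofcode2021/three/part1.py | part1
-- ===== SOURCE A (Python) =====
-- def bits_to_int(bits):
--     num = 0
--     for i, n in enumerate(reversed(bits)):
--         num |= n << i
--
--     return num
--
-- def part1(data):
--     ones = [0] * len(data[0])
--
--     for line in data:
--         for index, value in enumerate(line):
--             if value == 1:
--                 ones[index] += 1
--
--     gamma_bits = [1 if n > len(data)//2 else 0 for n in ones]
--     epsilon_bits = [1 if n == 0 else 0 for n in gamma_bits]
--     gamma = bits_to_int(gamma_bits)
--     epsilon = bits_to_int(epsilon_bits)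
--
--     return gamma, epsilon, gamma * epsilon
-- ===== SOURCE B (Python) =====
-- def part1(data):
--     total = len(data)
--     width = len(data[0])
--     half = total // 2
--     gamma = 0
--     for j in range(width):
--         count = sum(1 for line in data if j < len(line) and line[j] == 1)
--         gamma = 2 * gamma + (1 if count > half else 0)
--     epsilon = (2 ** width - 1) - gamma
--     return gamma, epsilon, gamma * epsilon
-- ===== Notes on version B (the rewrite author's own statement) =====
-- stated objective: simpler
-- what changed: Replaces the row-major counting pass, the two intermediate bit lists and the bits_to_int OR/shift helper by a column-major loop that packs gamma arithmetically (gamma = 2*gamma + bit) and derives epsilon in closed form as (2**width - 1) - gamma.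
import Mathlib
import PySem

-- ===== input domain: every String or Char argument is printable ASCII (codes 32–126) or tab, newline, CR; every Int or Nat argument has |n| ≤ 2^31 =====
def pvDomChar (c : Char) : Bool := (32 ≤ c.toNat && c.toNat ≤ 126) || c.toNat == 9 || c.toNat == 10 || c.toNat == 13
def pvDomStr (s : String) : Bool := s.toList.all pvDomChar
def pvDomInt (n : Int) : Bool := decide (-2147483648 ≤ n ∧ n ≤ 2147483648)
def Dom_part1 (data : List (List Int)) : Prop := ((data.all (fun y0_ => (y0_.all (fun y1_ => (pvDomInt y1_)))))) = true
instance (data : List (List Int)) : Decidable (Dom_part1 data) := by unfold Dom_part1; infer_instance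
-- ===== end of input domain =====

-- B packs gamma arithmetically column by column and derives epsilon in closed form; A builds bit lists and ORs shifted bits.
-- ===== PORT A =====
def bitsToInt (bits : List Int) : Int :=
  (PySem.List.enumerate bits.reverse 0).foldl
    (fun num p => PySem.Int.bor num (p.2 <<< p.1.toNat)) 0

-- inner 'for index, value in enumerate(line)' body of A
def aUpdate (ones : List Int) (p : Int × Int) : List Int :=
  if p.2 = 1 then ones.set p.1.toNat (ones.getD p.1.toNat 0 + 1) else ones

-- one iteration of A's 'for line in data' loop
def aLine (ones : List Int) (line : List Int) : List Int :=
  (PySem.List.enumerate line 0).foldl aUpdate ones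

def part1 (data : List (List Int)) : Int × Int × Int :=
  let ones := data.foldl aLine
    (List.replicate ((PySem.List.pyGet? data 0).getD []).length (0 : Int))
  let gamma_bits := ones.map (fun n => if n > PySem.Int.floordiv (data.length : Int) 2 then (1 : Int) else 0)
  let epsilon_bits := gamma_bits.map (fun n => if n = 0 then (1 : Int) else 0)
  let gamma := bitsToInt gamma_bits
  let epsilon := bitsToInt epsilon_bits
  (gamma, epsilon, gamma * epsilon)

-- ===== PORT B =====
-- 'sum(1 for line in data if j < len(line) and line[j] == 1)'
def bCount (data : List (List Int)) (j : Int) : Int :=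
  data.foldl (fun c line =>
    if (decide (j < (line.length : Int)) && decide (PySem.List.pyGetD line j 0 = 1)) then c + 1 else c) 0

def part1_alt (data : List (List Int)) : Int × Int × Int :=
  let total : Int := (data.length : Int)
  let width : Nat := ((PySem.List.pyGet? data 0).getD []).length
  let half : Int := PySem.Int.floordiv total 2
  let gamma := (PySem.List.pyRange 0 (width : Int) 1).foldl
    (fun g j => 2 * g + (if bCount data j > half then 1 else 0)) 0
  let epsilon := 2 ^ width - 1 - gamma
  (gamma, epsilon, gamma * epsilon)

-- ===== PRECONDITION & SPEC =====
-- Pre_ excludes exactly the inputs where A raises: empty data (IndexError on data[0]) and a row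
-- holding the value 1 at a column index ≥ len(data[0]) (IndexError on ones[index] += 1).
def Pre_part1 (data : List (List Int)) : Prop :=
  data ≠ [] ∧ ∀ line ∈ data, ∀ i : Nat, i < line.length →
    (data.headD []).length ≤ i → line.getD i 0 ≠ 1
instance (data : List (List Int)) : Decidable (Pre_part1 data) := by unfold Pre_part1; infer_instance
def pvWitness_part1 : List (List Int) := [[1, 0], [1, 1], [0, 0]]

def Spec_part1 (data : List (List Int)) (out : Int × Int × Int) : Prop := out = part1_alt data
instance (data : List (List Int)) (out : Int × Int × Int) : Decidable (Spec_part1 data out) := by unfold Spec_part1; infer_instance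

-- ===== CLAIM (what is proved, stated in full; the proofs are below) =====
def Claim_equal_part1 : Prop := ∀ (data : List (List Int)), Dom_part1 data → Pre_part1 data → Spec_part1 data (part1 data)

-- ===== LEMMAS AND PROOFS =====

-- number of rows whose j-th entry is 1
def countIn (data : List (List Int)) (j : Nat) : Int :=
  (data.countP (fun line => decide (j < line.length ∧ line.getD j 0 = 1)) : Int)

-- MSB-first value of a bit list
def bitval (b : List Int) : Int := b.foldl (fun a x => 2 * a + x) 0

theorem bitval_from (b : List Int) (a : Int) :
    b.foldl (fun a x => 2 * a + x) a = a * 2 ^ b.length + bitval b := by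
  induction b generalizing a with
  | nil => simp [bitval]
  | cons x r ih =>
    simp only [List.foldl_cons, List.length_cons, bitval]
    rw [ih (2 * a + x), ih (2 * 0 + x)]
    ring

theorem bitval_cons (x : Int) (r : List Int) :
    bitval (x :: r) = x * 2 ^ r.length + bitval r := by
  simp only [bitval, List.foldl_cons]
  have := bitval_from r (2 * 0 + x)
  simpa using this

theorem bitval_bounds (b : List Int) (h : ∀ x ∈ b, x = 0 ∨ x = 1) :
    0 ≤ bitval b ∧ bitval b < 2 ^ b.length := by
  induction b with
  | nil => simp [bitval]
  | cons x r ih =>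
    have hr := ih (fun y hy => h y (List.mem_cons_of_mem _ hy))
    have hx := h x (List.mem_cons_self)
    rw [bitval_cons, List.length_cons, pow_succ]
    rcases hx with rfl | rfl <;> constructor <;> nlinarith [hr.1, hr.2]

theorem lor_two_pow_of_lt (m k : Nat) (h : m < 2 ^ k) : m ||| 2 ^ k = m + 2 ^ k := by
  apply Nat.eq_of_testBit_eq
  intro i
  rw [Nat.testBit_lor, Nat.add_comm m (2 ^ k)]
  rcases lt_trichotomy i k with hik | rfl | hik
  · rw [Nat.testBit_two_pow_add_gt hik, Nat.testBit_two_pow_of_ne (by omega), Bool.or_false]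
  · rw [Nat.testBit_two_pow_add_eq, Nat.testBit_lt_two_pow h, Nat.testBit_two_pow_self]
    rfl
  · have hx : 2 ^ k + m < 2 ^ i := by
      have h2 : 2 ^ (k + 1) ≤ 2 ^ i := Nat.pow_le_pow_right (by norm_num) (by omega)
      rw [pow_succ] at h2; omega
    rw [Nat.testBit_lt_two_pow hx, Nat.testBit_lt_two_pow (by omega),
      Nat.testBit_two_pow_of_ne (by omega)]
    rfl

theorem int_bor_shift (v x : Int) (k : Nat) (h0 : 0 ≤ v) (h1 : v < 2 ^ k) (hx : x = 0 ∨ x = 1) :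
    PySem.Int.bor v (x <<< k) = v + x * 2 ^ k := by
  rcases hx with rfl | rfl
  · norm_num [Int.shiftLeft_eq, PySem.Int.bor_zero]
  · lift v to Nat using h0
    have hv : v < 2 ^ k := by exact_mod_cast h1
    have h2 : (1 : Int) <<< k = ((2 ^ k : Nat) : Int) := by simp [Int.shiftLeft_eq]
    rw [h2, PySem.Int.bor_natCast, lor_two_pow_of_lt v k hv]
    push_cast; ring

theorem bitsToInt_eq_bitval (b : List Int) (h : ∀ x ∈ b, x = 0 ∨ x = 1) :
    bitsToInt b = bitval b := by
  induction b with
  | nil => simp [bitsToInt, bitval]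
  | cons x r ih =>
    have hr := fun y hy => h y (List.mem_cons_of_mem _ hy)
    have hx := h x (List.mem_cons_self)
    have hb := bitval_bounds r hr
    have hrev : (x :: r).reverse = r.reverse ++ [x] := by simp
    simp only [bitsToInt, hrev, PySem.List.enumerate_append, List.foldl_append]
    have hlen : (PySem.List.enumerate r.reverse 0).foldl
        (fun num p => PySem.Int.bor num (p.2 <<< p.1.toNat)) 0 = bitsToInt r := rfl
    rw [hlen, ih hr]
    simp only [PySem.List.enumerate, List.length_reverse, List.foldl_cons, List.foldl_nil]
    have ht : ((0 + (r.length : Int))).toNat = r.length := by omega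
    rw [bitval_cons, ht, int_bor_shift (bitval r) x r.length hb.1 hb.2 hx]
    ring

theorem bitval_complement (b : List Int) (h : ∀ x ∈ b, x = 0 ∨ x = 1) :
    bitval (b.map (fun n => if n = 0 then (1 : Int) else 0)) = 2 ^ b.length - 1 - bitval b := by
  induction b with
  | nil => simp [bitval]
  | cons x r ih =>
    have hr := ih (fun y hy => h y (List.mem_cons_of_mem _ hy))
    have hx := h x (List.mem_cons_self)
    simp only [List.map_cons, List.length_cons]
    rw [bitval_cons, bitval_cons, List.length_map, pow_succ]
    rcases hx with rfl | rfl <;> simp <;> linarith [hr]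

theorem aInner (line : List Int) (s : Nat) (acc : List Int)
    (h : ∀ i : Nat, i < line.length → line.getD i 0 = 1 → s + i < acc.length) :
    ((PySem.List.enumerate line (s : Int)).foldl aUpdate acc).length = acc.length ∧
    ∀ j : Nat, ((PySem.List.enumerate line (s : Int)).foldl aUpdate acc).getD j 0 =
      acc.getD j 0 + (if s ≤ j ∧ j < s + line.length ∧ line.getD (j - s) 0 = 1 then 1 else 0) := by
  induction line generalizing s acc with
  | nil =>
    refine ⟨by simp [PySem.List.enumerate], fun j => ?_⟩
    have hn : ¬ (s ≤ j ∧ j < s + ([] : List Int).length ∧ ([] : List Int).getD (j - s) 0 = 1) := by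
      rintro ⟨h1, h2, -⟩; simp only [List.length_nil] at h2; omega
    rw [if_neg hn, add_zero]
    simp [PySem.List.enumerate]
  | cons x r ih =>
    rw [PySem.List.enumerate_cons, List.foldl_cons]
    have hcast : (s : Int) + 1 = ((s + 1 : Nat) : Int) := by push_cast; ring
    have hlen' : (aUpdate acc ((s : Int), x)).length = acc.length := by
      unfold aUpdate; split <;> simp
    have h' : ∀ i : Nat, i < r.length → r.getD i 0 = 1 → (s + 1) + i < (aUpdate acc ((s : Int), x)).length := by
      intro i hi hv
      rw [hlen']
      have := h (i + 1) (by simp; omega) (by rwa [List.getD_cons_succ])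
      omega
    have hs1 : x = 1 → s < acc.length := fun hx =>
      by have := h 0 (by simp) (by simpa using hx); omega
    have IH := ih (s + 1) (aUpdate acc ((s : Int), x)) h'
    rw [hcast]
    refine ⟨IH.1.trans hlen', fun j => ?_⟩
    rw [IH.2 j]
    have hred : aUpdate acc ((s : Int), x) =
        if x = 1 then acc.set s (acc.getD s 0 + 1) else acc := by
      simp [aUpdate]
    have hacc : (aUpdate acc ((s : Int), x)).getD j 0 =
        acc.getD j 0 + (if x = 1 ∧ j = s then 1 else 0) := by
      rw [hred]
      by_cases hx1 : x = 1
      · rw [if_pos hx1]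
        by_cases hjs : j = s
        · subst hjs
          rw [List.getD_eq_getElem?_getD, List.getElem?_set_self (hs1 hx1)]
          simp [hx1]
        · rw [List.getD_eq_getElem?_getD, List.getElem?_set_ne (by omega),
            ← List.getD_eq_getElem?_getD]
          simp [hjs]
      · simp [hx1]
    rw [hacc]
    rcases Nat.lt_trichotomy j s with hlt | heq | hgt
    · rw [if_neg (by rintro ⟨-, h2⟩; omega), if_neg (by rintro ⟨h1, -⟩; omega),
        if_neg (by rintro ⟨h1, -⟩; omega)]
      ring
    · have hI2 : ¬ ((s + 1 : Nat) ≤ j ∧ j < s + 1 + r.length ∧ r.getD (j - (s + 1)) 0 = 1) := by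
        rintro ⟨h1, -⟩; omega
      rw [if_neg hI2, add_zero]
      by_cases hx1 : x = 1
      · rw [if_pos (show x = 1 ∧ j = s from ⟨hx1, heq⟩)]
        have hv : (x :: r).getD (j - s) 0 = 1 := by
          rw [heq, Nat.sub_self, List.getD_cons_zero, hx1]
        rw [if_pos ⟨by omega, by simp only [List.length_cons]; omega, hv⟩]
      · rw [if_neg (by rintro ⟨h1, -⟩; exact hx1 h1)]
        rw [if_neg (by
          rintro ⟨-, -, h3⟩
          rw [heq, Nat.sub_self, List.getD_cons_zero] at h3
          exact hx1 h3)]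
    · rw [if_neg (by rintro ⟨-, h2⟩; omega)]
      have hget : (x :: r).getD (j - s) 0 = r.getD (j - (s + 1)) 0 := by
        have hs : j - s = (j - (s + 1)) + 1 := by omega
        rw [hs, List.getD_cons_succ]
      have hiff : (s ≤ j ∧ j < s + (x :: r).length ∧ (x :: r).getD (j - s) 0 = 1) ↔
          ((s + 1 : Nat) ≤ j ∧ j < s + 1 + r.length ∧ r.getD (j - (s + 1)) 0 = 1) := by
        rw [hget]; simp only [List.length_cons]
        constructor
        · rintro ⟨-, h2, h3⟩; exact ⟨by omega, by omega, h3⟩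
        · rintro ⟨-, h2, h3⟩; exact ⟨by omega, by omega, h3⟩
      rw [if_congr hiff rfl rfl]
      ring

theorem aFold (data : List (List Int)) (acc : List Int)
    (h : ∀ line ∈ data, ∀ i : Nat, i < line.length → line.getD i 0 = 1 → i < acc.length) :
    (data.foldl aLine acc).length = acc.length ∧
    ∀ j : Nat, (data.foldl aLine acc).getD j 0 = acc.getD j 0 + countIn data j := by
  induction data generalizing acc with
  | nil => simp [countIn]
  | cons line rest ih =>
    rw [List.foldl_cons]
    have hline := h line List.mem_cons_self
    have hinner := aInner line 0 acc (by intro i hi hv; have := hline i hi hv; omega)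
    simp only [Nat.cast_zero] at hinner
    have hinner' : aLine acc line = (PySem.List.enumerate line (0 : Int)).foldl aUpdate acc := rfl
    have hrest : ∀ l ∈ rest, ∀ i : Nat, i < l.length → l.getD i 0 = 1 → i < (aLine acc line).length := by
      intro l hl i hi hv
      rw [hinner', hinner.1]
      exact h l (List.mem_cons_of_mem _ hl) i hi hv
    have IH := ih (aLine acc line) hrest
    refine ⟨IH.1.trans (by rw [hinner']; exact hinner.1), fun j => ?_⟩
    rw [IH.2 j, hinner', hinner.2 j]
    have hcnt : countIn (line :: rest) j =
        (if (0:Nat) ≤ j ∧ j < 0 + line.length ∧ line.getD (j - 0) 0 = 1 then 1 else 0) + countIn rest j := by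
      simp only [countIn, List.countP_cons]
      by_cases hc : j < line.length ∧ line.getD j 0 = 1
      · rw [if_pos (show (0:Nat) ≤ j ∧ j < 0 + line.length ∧ line.getD (j - 0) 0 = 1 from
          ⟨Nat.zero_le _, by omega, by simpa using hc.2⟩)]
        simp only [decide_eq_true hc, if_true]
        push_cast; ring
      · have hd : decide (j < line.length ∧ line.getD j 0 = 1) = false := decide_eq_false hc
        simp only [hd, Bool.false_eq_true, if_false]
        rw [if_neg (by rintro ⟨-, h2, h3⟩; exact hc ⟨by omega, by simpa using h3⟩)]
        push_cast; ring
    rw [hcnt]; ring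

theorem bCount_natCast (data : List (List Int)) (k : Nat) :
    bCount data (k : Int) = countIn data k := by
  unfold bCount countIn
  rw [PySem.List.foldl_count_if
    (fun line => decide ((k : Int) < (line.length : Int)) && decide (PySem.List.pyGetD line (k : Int) 0 = 1)) data 0,
    zero_add]
  congr 1
  apply List.countP_congr
  intro line _
  simp [PySem.List.pyGetD_natCast]

theorem b_gamma_eq (data : List (List Int)) (w : Nat) (half : Int) :
    (PySem.List.pyRange 0 (w : Int) 1).foldl
      (fun g j => 2 * g + (if bCount data j > half then 1 else 0)) 0
    = bitval ((List.range w).map (fun k => if countIn data k > half then (1 : Int) else 0)) := by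
  rw [PySem.List.pyRange_zero_nat w, List.foldl_map, bitval, List.foldl_map]
  apply List.foldl_ext
  intro a k _
  rw [bCount_natCast]

theorem bits01 (data : List (List Int)) (w : Nat) (half : Int) :
    ∀ x ∈ (List.range w).map (fun k => if countIn data k > half then (1 : Int) else 0),
      x = 0 ∨ x = 1 := by
  intro x hx
  simp only [List.mem_map] at hx
  obtain ⟨k, -, rfl⟩ := hx
  split_ifs <;> simp

-- ===== VERDICT (by name: the statement is the Claim_ definition above) =====
theorem part1_spec : Claim_equal_part1 := by
  intro data _ hpre
  obtain ⟨hne, hrows⟩ := hpre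
  unfold Spec_part1
  have hhead : (PySem.List.pyGet? data 0).getD [] = data.headD [] := by
    cases data with
    | nil => exact absurd rfl hne
    | cons a l => simp [PySem.List.pyGet?, PySem.List.pyIdx?]
  set w := ((PySem.List.pyGet? data 0).getD []).length with hw
  set half := PySem.Int.floordiv (data.length : Int) 2 with hhalf
  have hlen : ∀ line ∈ data, ∀ i : Nat, i < line.length → line.getD i 0 = 1 → i < w := by
    intro line hl i hi hv
    by_contra hge
    exact hrows line hl i hi (by rw [← hhead, ← hw]; omega) hv
  have hones := aFold data (List.replicate w (0 : Int)) (by simpa using hlen)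
  have hones_eq : data.foldl aLine (List.replicate w (0 : Int)) =
      (List.range w).map (fun j => countIn data j) := by
    apply List.ext_getElem
    · rw [hones.1]; simp
    · intro i h1 h2
      have hiw : i < w := by simpa using h2
      have hv := hones.2 i
      rw [List.getD_replicate (0 : Int) hiw, zero_add] at hv
      rw [← List.getD_eq_getElem _ 0 h1, hv]
      simp
  set gb := (List.range w).map (fun k => if countIn data k > half then (1 : Int) else 0) with hgb
  have hmapf : ((List.range w).map (fun j => countIn data j)).map
      (fun n => if n > half then (1 : Int) else 0) = gb := by
    rw [List.map_map]; rfl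
  have hgb01 := bits01 data w half
  have hgblen : gb.length = w := by simp [hgb]
  have heps01 : ∀ x ∈ gb.map (fun n => if n = 0 then (1 : Int) else 0), x = 0 ∨ x = 1 := by
    intro x hx
    simp only [List.mem_map] at hx
    obtain ⟨k, -, rfl⟩ := hx
    split_ifs <;> simp
  have hA : part1 data = (bitval gb, 2 ^ w - 1 - bitval gb,
      bitval gb * (2 ^ w - 1 - bitval gb)) := by
    simp only [part1, ← hw, ← hhalf, hones_eq, hmapf]
    rw [bitsToInt_eq_bitval _ hgb01, bitsToInt_eq_bitval _ heps01, bitval_complement _ hgb01, hgblen]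
  have hB : part1_alt data = (bitval gb, 2 ^ w - 1 - bitval gb,
      bitval gb * (2 ^ w - 1 - bitval gb)) := by
    simp only [part1_alt, ← hw, ← hhalf]
    rw [b_gamma_eq data w half, ← hgb]
  rw [hA, hB]
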